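-- pv_equiv track=rewrite | github.com/brayangpx/random_number_simulation | src/ui/additive_gui.py | additive_method
-- ===== SOURCE A (Python) =====
-- def additive_method(seeds, m, total):
--     # Implementación del método aditivo
--     vArranque = seeds[:]
--     resultado = []
--
--     for i in range(total - len(seeds)):
--         # Sumamos el primer valor con el último y aplicamos el módulo
--         nuevo_valor = (vArranque[0] + vArranque[-1]) % m
--         resultado.append(nuevo_valor)
--         # Actualizamos el array, removemos el más antiguo y añadimos el nuevo valor
--         vArranque.append(nuevo_valor)
--         vArranque.pop(0)
--
--     # Retornar los valores generados
--     return resultado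
-- ===== SOURCE B (Python) =====
-- def additive_method(seeds, m, total):
--     # Keep the whole sequence; index history by absolute position, no window mutation.
--     k = len(seeds)
--     seq = list(seeds)
--     for i in range(k, total):
--         seq.append((seq[i - k] + seq[i - 1]) % m)
--     return seq[k:]
-- ===== Notes on version B (the rewrite author's own statement) =====
-- stated objective: simpler
-- what changed: B keeps the whole generated sequence in one list and computes each new value by absolute-position indexing seq[i-k] and seq[i-1], instead of A's fixed-size sliding window mutated by append+pop(0) each step; the result is the suffix seq[k:].
import Mathlib
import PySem

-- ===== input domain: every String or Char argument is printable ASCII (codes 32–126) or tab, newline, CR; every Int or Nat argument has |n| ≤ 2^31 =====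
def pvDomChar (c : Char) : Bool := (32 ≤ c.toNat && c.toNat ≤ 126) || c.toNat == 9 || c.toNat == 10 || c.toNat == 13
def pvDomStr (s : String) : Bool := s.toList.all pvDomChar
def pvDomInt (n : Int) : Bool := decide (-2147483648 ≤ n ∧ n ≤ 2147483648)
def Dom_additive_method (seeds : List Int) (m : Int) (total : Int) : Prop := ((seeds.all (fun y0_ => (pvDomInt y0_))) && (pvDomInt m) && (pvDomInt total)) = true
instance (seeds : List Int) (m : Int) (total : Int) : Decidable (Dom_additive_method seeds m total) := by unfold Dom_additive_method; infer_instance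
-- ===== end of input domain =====

-- B replaces A's sliding window (mutated by append+pop(0) each step) with one growing
-- sequence indexed by absolute position; objective: simpler. Return value only (A copies seeds, no observable mutation).

-- ===== PORT A =====
-- loop of A: fuel = total - len(seeds) iterations over the state (vArranque, resultado)
def additive_method.go (m : Int) : Nat → List Int → List Int → List Int
  | 0, _, res => res
  | n+1, v, res =>
    let nuevo := PySem.Int.mod (PySem.List.pyGetD v 0 0 + PySem.List.pyGetD v (-1) 0) m
    additive_method.go m n ((v ++ [nuevo]).tail) (res ++ [nuevo])

def additive_method (seeds : List Int) (m : Int) (total : Int) : List Int :=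
  additive_method.go m ((total - (seeds.length : Int)).toNat) seeds []

-- ===== PORT B =====
def additive_method_alt (seeds : List Int) (m : Int) (total : Int) : List Int :=
  let k : Int := (seeds.length : Int)
  let seq := (PySem.List.pyRange k total 1).foldl
    (fun s i => s ++ [PySem.Int.mod (PySem.List.pyGetD s (i - k) 0 + PySem.List.pyGetD s (i - 1) 0) m]) seeds
  PySem.List.slice seq (some k) none

-- ===== PRECONDITION & SPEC =====
-- A raises IndexError on empty seeds and ZeroDivisionError on m = 0 whenever at least one
-- value must be generated (total > len(seeds)); exactly those inputs are excluded.
def Pre_additive_method (seeds : List Int) (m : Int) (total : Int) : Prop :=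
  total ≤ (seeds.length : Int) ∨ (seeds ≠ [] ∧ m ≠ 0)
instance (seeds : List Int) (m : Int) (total : Int) : Decidable (Pre_additive_method seeds m total) := by unfold Pre_additive_method; infer_instance
def pvWitness_additive_method : List Int × Int × Int := ([1, 2], 5, 6)

def Spec_additive_method (seeds : List Int) (m : Int) (total : Int) (out : List Int) : Prop := out = additive_method_alt seeds m total
instance (seeds : List Int) (m : Int) (total : Int) (out : List Int) : Decidable (Spec_additive_method seeds m total out) := by unfold Spec_additive_method; infer_instance

-- ===== CLAIM (what is proved, stated in full; the proofs are below) =====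
def Claim_equal_additive_method : Prop := ∀ (seeds : List Int) (m : Int) (total : Int), Dom_additive_method seeds m total → Pre_additive_method seeds m total → Spec_additive_method seeds m total (additive_method seeds m total)

-- ===== LEMMAS AND PROOFS =====

-- Invariant: after some steps B's accumulated list is `seq`; A's window is the last k
-- elements of `seq` and A's result list is seq with the k seeds dropped.
theorem additive_method.go_eq (m total : Int) (k : Nat) (hk : 0 < k) :
    ∀ (n : Nat) (seq : List Int), k ≤ seq.length → n = (total - (seq.length : Int)).toNat →
      additive_method.go m n (seq.drop (seq.length - k)) (seq.drop k)
        = ((PySem.List.pyRange (seq.length : Int) total 1).foldl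
            (fun s i => s ++ [PySem.Int.mod (PySem.List.pyGetD s (i - k) 0 + PySem.List.pyGetD s (i - 1) 0) m]) seq).drop k := by
  intro n
  induction n with
  | zero =>
    intro seq hlen hn
    have htot : total ≤ (seq.length : Int) := by omega
    rw [PySem.List.pyRange_one_eq_nil htot]
    rfl
  | succ n ih =>
    intro seq hlen hn
    have hlt : (seq.length : Int) < total := by omega
    have hBa : ((seq.length : Int) - k) = ((seq.length - k : Nat) : Int) := by omega
    have hBb : ((seq.length : Int) - 1) = ((seq.length - 1 : Nat) : Int) := by omega
    rw [PySem.List.pyRange_one_cons hlt, List.foldl_cons]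
    simp only [hBa, hBb, PySem.List.pyGetD_natCast]
    set w : Int := PySem.Int.mod (seq.getD (seq.length - k) 0 + seq.getD (seq.length - 1) 0) m with hw
    have hv : seq.drop (seq.length - k) ≠ [] := by
      intro h
      have := congrArg List.length h
      simp [List.length_drop] at this
      omega
    have hgetlast : PySem.List.pyGetD (seq.drop (seq.length - k)) (-1) 0 = seq.getD (seq.length - 1) 0 := by
      rw [PySem.List.pyGetD_neg_one (h := hv), List.getLast_eq_getElem, List.getElem_eq_iff]
      rw [List.getElem?_drop]
      have hidx : seq.length - k + ((seq.drop (seq.length - k)).length - 1) = seq.length - 1 := by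
        simp [List.length_drop]; omega
      rw [hidx]
      simp [List.getD, List.getElem?_eq_getElem (show seq.length - 1 < seq.length by omega)]
    have hget0 : PySem.List.pyGetD (seq.drop (seq.length - k)) 0 0 = seq.getD (seq.length - k) 0 := by
      rw [PySem.List.pyGetD_zero]
      simp [List.getD, List.getElem?_drop]
    show additive_method.go m (n+1) (seq.drop (seq.length - k)) (seq.drop k) = _
    rw [additive_method.go]
    have hnuevo : PySem.Int.mod (PySem.List.pyGetD (seq.drop (seq.length - k)) 0 0 + PySem.List.pyGetD (seq.drop (seq.length - k)) (-1) 0) m = w := by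
      rw [hget0, hgetlast]
    simp only [hnuevo]
    have hvstate : (seq.drop (seq.length - k) ++ [w]).tail = (seq ++ [w]).drop ((seq ++ [w]).length - k) := by
      rw [← List.drop_append_of_le_length (by omega)]
      rw [List.tail_drop]
      congr 1
      simp; omega
    have hrstate : seq.drop k ++ [w] = (seq ++ [w]).drop k := by
      rw [List.drop_append_of_le_length hlen]
    rw [hvstate, hrstate]
    have hlen' : (((seq ++ [w]).length : Nat) : Int) = (seq.length : Int) + 1 := by simp
    have hih := ih (seq ++ [w]) (by simp; omega) (by simp; omega)
    rw [hih, hlen']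

-- ===== VERDICT (by name: the statement is the Claim_ definition above) =====
theorem additive_method_spec : Claim_equal_additive_method := by
  intro seeds m total _hDom hPre
  unfold Spec_additive_method additive_method additive_method_alt
  rw [PySem.List.slice_from_natCast]
  by_cases hs : seeds = []
  · subst hs
    rcases hPre with h | h
    · simp at h
      have : (total - ((List.length ([] : List Int)) : Int)).toNat = 0 := by simp; omega
      rw [this, PySem.List.pyRange_one_eq_nil (by simp; omega)]
      rfl
    · exact absurd rfl h.1
  · have hk : 0 < seeds.length := List.length_pos_of_ne_nil hs
    have := additive_method.go_eq m total seeds.length hk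
      ((total - (seeds.length : Int)).toNat) seeds le_rfl rfl
    simpa using this
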